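-- pv_equiv track=rewrite | github.com/mxie/architecture-simulator | instr_models.py | set_control_signals
-- ===== SOURCE A (Python) =====
-- def set_control_signals(instr):
--     signals = { 'RegDst': 0,
--                 'ALUSrc': 0,
--                 'MemtoReg': 0,
--                 'RegWrite': 0,
--                 'MemRead': 0,
--                 'MemWrite': 0,
--                 'Branch': 0,
--                 'ALUOp1': 0,
--                 'ALUOp0': 0,
--                 'Jump': 0 }
--
--     if instr == 'lw':
--         for s in ['ALUSrc','MemtoReg','RegWrite','MemRead']:
--             signals[s] = 1
--     elif instr == 'sw':
--         for s in ['MemtoReg','MemWrite']: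
--             signals[s] = 1
--     elif instr == 'addi':
--         for s in ['ALUSrc','RegWrite']:
--             signals[s] = 1
--     elif instr == 'beq':
--         for s in ['Branch','ALUOp0']:
--             signals[s] = 1
--
--     return signals
-- ===== SOURCE B (Python) =====
-- # Inverted table: for each control signal, the instructions that assert it.
-- _ACTIVATORS = [
--     ('RegDst',   ()),
--     ('ALUSrc',   ('lw', 'addi')),
--     ('MemtoReg', ('lw', 'sw')),
--     ('RegWrite', ('lw', 'addi')),
--     ('MemRead',  ('lw',)),
--     ('MemWrite', ('sw',)),
--     ('Branch',   ('beq',)),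
--     ('ALUOp1',   ()),
--     ('ALUOp0',   ('beq',)),
--     ('Jump',     ()),
-- ]
--
-- def set_control_signals(instr):
--     return {sig: int(instr in who) for sig, who in _ACTIVATORS}
-- ===== Notes on version B (the rewrite author's own statement) =====
-- stated objective: alternative
-- what changed: Inverted the data: instead of dispatching on the instruction and mutating a zero dict key by key, B keeps, per control signal, the set of instructions that assert it, and builds the dict in one comprehension over the 10 signals with a membership test each.
import Mathlib
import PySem

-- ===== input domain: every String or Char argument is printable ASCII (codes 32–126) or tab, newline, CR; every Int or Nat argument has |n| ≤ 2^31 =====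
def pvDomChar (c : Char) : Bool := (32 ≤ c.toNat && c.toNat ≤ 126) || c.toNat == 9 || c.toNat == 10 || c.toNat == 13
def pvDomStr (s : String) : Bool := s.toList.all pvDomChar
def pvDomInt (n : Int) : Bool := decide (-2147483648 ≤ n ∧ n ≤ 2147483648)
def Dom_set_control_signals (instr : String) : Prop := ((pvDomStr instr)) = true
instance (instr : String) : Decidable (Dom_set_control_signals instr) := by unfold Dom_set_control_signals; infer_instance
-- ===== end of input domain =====

set_option maxRecDepth 4000


-- B inverts the data: a per-signal table of the instructions asserting each signal,
-- built in one pass with a membership test per signal (alternative decomposition, same cost).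

-- ===== PORT A =====
def set_control_signals (instr : String) : List (String × Int) :=
  let signals : PySem.Dict String Int :=
    PySem.Dict.ofList [("RegDst", 0), ("ALUSrc", 0), ("MemtoReg", 0), ("RegWrite", 0),
     ("MemRead", 0), ("MemWrite", 0), ("Branch", 0), ("ALUOp1", 0),
     ("ALUOp0", 0), ("Jump", 0)]
  if instr == "lw" then
    (["ALUSrc", "MemtoReg", "RegWrite", "MemRead"].foldl (fun d s => PySem.Dict.insert d s 1) signals).items
  else if instr == "sw" then
    (["MemtoReg", "MemWrite"].foldl (fun d s => PySem.Dict.insert d s 1) signals).items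
  else if instr == "addi" then
    (["ALUSrc", "RegWrite"].foldl (fun d s => PySem.Dict.insert d s 1) signals).items
  else if instr == "beq" then
    (["Branch", "ALUOp0"].foldl (fun d s => PySem.Dict.insert d s 1) signals).items
  else
    signals.items

-- ===== PORT B =====
-- inverted table: (signal, instructions that assert it)
def pvActivators : List (String × List String) :=
  [("RegDst",   []),
   ("ALUSrc",   ["lw", "addi"]),
   ("MemtoReg", ["lw", "sw"]),
   ("RegWrite", ["lw", "addi"]),
   ("MemRead",  ["lw"]),
   ("MemWrite", ["sw"]),
   ("Branch",   ["beq"]),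
   ("ALUOp1",   []),
   ("ALUOp0",   ["beq"]),
   ("Jump",     [])]

def set_control_signals_alt (instr : String) : List (String × Int) :=
  pvActivators.map (fun kv => (kv.1, if kv.2.contains instr then (1 : Int) else 0))

-- ===== PRECONDITION & SPEC =====
def Spec_set_control_signals (instr : String) (out : List (String × Int)) : Prop := out = set_control_signals_alt instr
instance (instr : String) (out : List (String × Int)) : Decidable (Spec_set_control_signals instr out) := by unfold Spec_set_control_signals; infer_instance

-- ===== CLAIM (what is proved, stated in full; the proofs are below) =====
def Claim_equal_set_control_signals : Prop := ∀ (instr : String), Dom_set_control_signals instr → Spec_set_control_signals instr (set_control_signals instr)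

-- ===== LEMMAS AND PROOFS =====

-- ===== VERDICT (by name: the statement is the Claim_ definition above) =====
theorem set_control_signals_spec : Claim_equal_set_control_signals := by
  intro instr _
  unfold Spec_set_control_signals set_control_signals set_control_signals_alt pvActivators
  by_cases h1 : instr = "lw"
  · subst h1; decide
  by_cases h2 : instr = "sw"
  · subst h2; decide
  by_cases h3 : instr = "addi"
  · subst h3; decide
  by_cases h4 : instr = "beq"
  · subst h4; decide
  have f1 : (instr == "lw") = false := by simpa using h1
  have f2 : (instr == "sw") = false := by simpa using h2
  have f3 : (instr == "addi") = false := by simpa using h3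
  have f4 : (instr == "beq") = false := by simpa using h4
  simp only [f1, f2, f3, f4, Bool.false_eq_true, if_false]
  simp only [List.map_cons, List.map_nil, List.contains_cons, List.contains_nil,
             f1, f2, f3, f4, Bool.or_self]
  clear f1 f2 f3 f4 h1 h2 h3 h4
  rfl
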